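-- pv_equiv track=rewrite | github.com/pypi-data/pypi-mirror-402 | packages/rubric-kit/rubric_kit-0.1.5-py3-none-any.whl/rubric_kit/pdf_export.py | _format_content_for_pdf
-- ===== SOURCE A (Python) =====
-- def _escape_xml(text: str) -> str:
--     """Escape XML special characters for ReportLab Paragraph."""
--     return text.replace('&', '&amp;').replace('<', '&lt;').replace('>', '&gt;')
--
-- def _format_content_for_pdf(text: str) -> str:
--     """Format text content for PDF display, preserving newlines and indentation."""
--     escaped = _escape_xml(str(text))
--
--     # Process line by line to preserve leading indentation
--     lines = escaped.split('\n')
--     formatted_lines = []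
--     for line in lines:
--         # Count leading spaces and convert to non-breaking spaces
--         stripped = line.lstrip(' ')
--         leading_spaces = len(line) - len(stripped)
--         if leading_spaces > 0:
--             # Use &nbsp; for leading spaces to preserve indentation
--             line = '&nbsp;' * leading_spaces + stripped
--         formatted_lines.append(line)
--
--     # Join with <br/> for proper line breaks in PDF
--     return '<br/>'.join(formatted_lines)
-- ===== SOURCE B (Python) =====
-- def _format_content_for_pdf(text: str) -> str:
--     """Format text content for PDF display, preserving newlines and indentation.
--
--     Single character-level pass with an at-line-start flag: leading spaces become
--     &nbsp;, newlines become <br/>, XML specials are escaped inline.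
--     """
--     out = []
--     at_start = True
--     for ch in str(text):
--         if at_start and ch == ' ':
--             out.append('&nbsp;')
--         elif ch == '\n':
--             out.append('<br/>')
--             at_start = True
--         else:
--             if ch == '&':
--                 out.append('&amp;')
--             elif ch == '<':
--                 out.append('&lt;')
--             elif ch == '>':
--                 out.append('&gt;')
--             else:
--                 out.append(ch)
--             at_start = False
--     return ''.join(out)
-- ===== Notes on version B (the rewrite author's own statement) =====
-- stated objective: alternative
-- what changed: A escapes the whole string, splits it on '\n', rewrites each line's leading spaces via lstrip/count, and joins with '<br/>'; B makes a single character-level pass with an at-line-start flag, emitting &nbsp;/<br/>/escapes inline, with no line list, lstrip or join.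
import Mathlib
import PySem

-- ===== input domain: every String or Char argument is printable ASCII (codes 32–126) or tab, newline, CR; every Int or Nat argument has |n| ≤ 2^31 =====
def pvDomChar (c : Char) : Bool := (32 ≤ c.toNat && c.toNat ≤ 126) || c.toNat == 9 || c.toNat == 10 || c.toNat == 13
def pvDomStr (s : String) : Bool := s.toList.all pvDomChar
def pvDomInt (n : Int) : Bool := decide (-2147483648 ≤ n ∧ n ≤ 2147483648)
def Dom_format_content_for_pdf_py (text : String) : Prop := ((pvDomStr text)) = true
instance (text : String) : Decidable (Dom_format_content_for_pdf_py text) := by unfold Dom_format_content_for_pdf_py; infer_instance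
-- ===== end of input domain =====

-- B replaces A's escape → split('\n') → per-line lstrip/count → join pipeline by ONE character-level
-- pass with an at-line-start flag (objective: alternative single-pass algorithm, same result).

-- ===== PORT A =====
-- _escape_xml: three chained str.replace calls (worked on the char list; PySem.Chars.replace is exact)
def pvEscXml (s : List Char) : List Char :=
  PySem.Chars.replace
    (PySem.Chars.replace (PySem.Chars.replace s ['&'] "&amp;".toList) ['<'] "&lt;".toList)
    ['>'] "&gt;".toList

-- the loop body: count leading spaces (line.lstrip(' ') = dropWhile (· == ' '), exact: only ' ' is
-- stripped; the Python locals `stripped`/`leading` are inlined)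
def pvFmtLine (line : List Char) : List Char :=
  if line.length - (line.dropWhile (· == ' ')).length > 0 then
    PySem.List.pyRepeat "&nbsp;".toList ((line.length - (line.dropWhile (· == ' ')).length : Nat) : Int)
      ++ line.dropWhile (· == ' ')
  else line

def format_content_for_pdf_py (text : String) : String :=
  let escaped := pvEscXml text.toList
  let lines := PySem.Chars.splitOn escaped ['\n']
  let formatted := lines.foldl (fun acc line => acc ++ [pvFmtLine line]) []
  String.ofList (PySem.Chars.join "<br/>".toList formatted)

-- ===== PORT B =====
def pvEscChar (c : Char) : List Char :=
  if c == '&' then "&amp;".toList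
  else if c == '<' then "&lt;".toList
  else if c == '>' then "&gt;".toList
  else [c]

-- the single pass of Source B: atStart = "we are in a line's leading-space run"
def pvGoB : Bool → List Char → List Char
  | _, [] => []
  | atStart, c :: rest =>
    if atStart && (c == ' ') then "&nbsp;".toList ++ pvGoB true rest
    else if c == '\n' then "<br/>".toList ++ pvGoB true rest
    else pvEscChar c ++ pvGoB false rest

def format_content_for_pdf_py_alt (text : String) : String :=
  String.ofList (pvGoB true text.toList)

-- ===== PRECONDITION & SPEC =====
def Spec_format_content_for_pdf_py (text : String) (out : String) : Prop := out = format_content_for_pdf_py_alt text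
instance (text : String) (out : String) : Decidable (Spec_format_content_for_pdf_py text out) := by unfold Spec_format_content_for_pdf_py; infer_instance

-- ===== CLAIM (what is proved, stated in full; the proofs are below) =====
def Claim_equal_format_content_for_pdf_py : Prop := ∀ (text : String), Dom_format_content_for_pdf_py text → Spec_format_content_for_pdf_py text (format_content_for_pdf_py text)

-- ===== LEMMAS AND PROOFS =====

-- str.replace with a one-char pattern is a flatMap
theorem pv_rep_go (o : Char) (new : List Char) :
    ∀ (fuel : Nat) (l acc : List Char), l.length ≤ fuel →
      PySem.Chars.replace.go [o] new fuel l acc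
        = acc.reverse ++ l.flatMap (fun c => if c = o then new else [c]) := by
  intro fuel
  induction fuel with
  | zero =>
    intro l acc h
    have : l = [] := by cases l <;> simp_all
    subst this; simp [PySem.Chars.replace.go]
  | succ n ih =>
    intro l acc h
    cases l with
    | nil => simp [PySem.Chars.replace.go]
    | cons c t =>
      by_cases hco : c = o
      · subst hco
        have hp : List.isPrefixOf [c] (c :: t) = true := by simp [List.isPrefixOf]
        simp only [PySem.Chars.replace.go, hp, if_pos]
        have hdrop : List.drop [c].length (c :: t) = t := rfl
        rw [hdrop, ih t (new.reverse ++ acc) (by simpa using Nat.le_of_succ_le_succ h)]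
        simp
      · have hp : List.isPrefixOf [o] (c :: t) = false := by
          simp [List.isPrefixOf]; exact fun h' => (hco h'.symm).elim
        simp only [PySem.Chars.replace.go, hp]
        rw [if_neg (by simp)]
        rw [ih t (c :: acc) (by simpa using Nat.le_of_succ_le_succ h)]
        simp [hco]

theorem pv_rep_eq (o : Char) (new l : List Char) :
    PySem.Chars.replace l [o] new = l.flatMap (fun c => if c = o then new else [c]) := by
  rw [PySem.Chars.replace]
  simp only [List.isEmpty_cons, Bool.false_eq_true, if_false]
  exact (pv_rep_go o new l.length l [] le_rfl).trans (by simp)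

theorem pv_esc_flatMap (l : List Char) : pvEscXml l = l.flatMap pvEscChar := by
  unfold pvEscXml
  rw [pv_rep_eq, pv_rep_eq, pv_rep_eq, List.flatMap_assoc, List.flatMap_assoc]
  apply List.flatMap_congr
  intro c _
  by_cases h1 : c = '&'
  · subst h1; decide
  · by_cases h2 : c = '<'
    · subst h2; decide
    · by_cases h3 : c = '>'
      · subst h3; decide
      · simp [pvEscChar, h1, h2, h3]

-- the line structure of a char list (proof-side reference for str.split('\n'))
def pvLines : List Char → List (List Char)
  | [] => [[]]
  | c :: t => if c = '\n' then [] :: pvLines t else (c :: (pvLines t).headI) :: (pvLines t).tail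

theorem pvLines_cons_shape (l : List Char) : ∃ h t, pvLines l = h :: t := by
  cases l with
  | nil => exact ⟨[], [], rfl⟩
  | cons c t => by_cases h : c = '\n' <;> simp [pvLines, h]

theorem pvLines_nl (t : List Char) : pvLines ('\n' :: t) = [] :: pvLines t := by
  simp [pvLines]

theorem pvLines_cons (c : Char) (t h : List Char) (tl : List (List Char))
    (hc : c ≠ '\n') (hht : pvLines t = h :: tl) :
    pvLines (c :: t) = (c :: h) :: tl := by
  simp [pvLines, hc, hht]

theorem pv_split_go :
    ∀ (fuel : Nat) (l cur : List Char) (acc : List (List Char)), l.length < fuel →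
      PySem.Chars.splitOn.go ['\n'] fuel l cur acc
        = acc.reverse ++ (pvLines l).modifyHead (cur.reverse ++ ·) := by
  intro fuel
  induction fuel with
  | zero => intro l cur acc h; omega
  | succ n ih =>
    intro l cur acc h
    cases l with
    | nil => simp [PySem.Chars.splitOn.go, pvLines]
    | cons c t =>
      by_cases hc : c = '\n'
      · subst hc
        have hp : List.isPrefixOf ['\n'] ('\n' :: t) = true := by simp [List.isPrefixOf]
        simp only [PySem.Chars.splitOn.go, hp, if_pos]
        have hdrop : List.drop ['\n'].length ('\n' :: t) = t := rfl
        rw [hdrop, ih t [] (cur.reverse :: acc) (by simpa using Nat.lt_of_succ_lt_succ h)]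
        simp only [pvLines_nl, List.reverse_cons, List.modifyHead, List.reverse_nil,
          List.nil_append, List.append_assoc, List.cons_append]
        simp
        exact congrFun List.modifyHead_id (pvLines t)
      · have hp : List.isPrefixOf ['\n'] (c :: t) = false := by
          simp [List.isPrefixOf]; exact fun h' => (hc h'.symm).elim
        simp only [PySem.Chars.splitOn.go, hp]
        rw [if_neg (by simp)]
        rw [ih t (c :: cur) acc (by simpa using Nat.lt_of_succ_lt_succ h)]
        obtain ⟨hh, tt, hht⟩ := pvLines_cons_shape t
        simp [pvLines_cons c t hh tt hc hht, hht, List.modifyHead]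

theorem pv_split_eq (l : List Char) : PySem.Chars.splitOn l ['\n'] = pvLines l := by
  rw [PySem.Chars.splitOn, pv_split_go (l.length + 1) l [] [] (Nat.lt_succ_self _)]
  simp only [List.reverse_nil, List.nil_append]
  exact congrFun List.modifyHead_id (pvLines l)

theorem pvLines_append_nonl (x y : List Char) (hx : '\n' ∉ x) :
    pvLines (x ++ y) = (x ++ (pvLines y).headI) :: (pvLines y).tail := by
  induction x with
  | nil =>
    obtain ⟨h, t, ht⟩ := pvLines_cons_shape y
    simp [ht]
  | cons c t ih =>
    have hc : c ≠ '\n' := fun h => hx (h ▸ List.mem_cons_self ..)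
    have ht : '\n' ∉ t := fun h => hx (List.mem_cons_of_mem _ h)
    simp [pvLines, hc, ih ht]

theorem pvEscChar_no_nl (c : Char) (hc : c ≠ '\n') : '\n' ∉ pvEscChar c := by
  unfold pvEscChar
  by_cases h1 : c = '&'
  · subst h1; decide
  · by_cases h2 : c = '<'
    · subst h2; decide
    · by_cases h3 : c = '>'
      · subst h3; decide
      · simp only [h1, h2, h3, beq_iff_eq, if_false, List.mem_singleton]
        exact fun h => hc h.symm

theorem pv_lines_esc (l : List Char) :
    pvLines (l.flatMap pvEscChar) = (pvLines l).map (fun x => x.flatMap pvEscChar) := by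
  induction l with
  | nil => simp [pvLines]
  | cons c t ih =>
    obtain ⟨h, t', ht⟩ := pvLines_cons_shape t
    by_cases hc : c = '\n'
    · subst hc
      have he : pvEscChar '\n' = ['\n'] := by decide
      rw [List.flatMap_cons, he, List.singleton_append, pvLines_nl, pvLines_nl, ih]
      simp
    · rw [List.flatMap_cons, pvLines_append_nonl _ _ (pvEscChar_no_nl c hc), ih,
          pvLines_cons c t h t' hc ht, ht]
      simp

-- pvFmtLine facts
theorem pv_fmt_nil : pvFmtLine [] = [] := by decide

theorem pv_fmt_nospace (c : Char) (x : List Char) (hc : c ≠ ' ') : pvFmtLine (c :: x) = c :: x := by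
  unfold pvFmtLine
  have hd : (c :: x).dropWhile (· == ' ') = c :: x := by
    rw [List.dropWhile_cons_of_neg]; simp [hc]
  rw [hd]
  simp

theorem pv_pyRepeat_succ (xs : List Char) (k : Nat) :
    PySem.List.pyRepeat xs ((k + 1 : Nat) : Int) = xs ++ PySem.List.pyRepeat xs ((k : Nat) : Int) := by
  simp [PySem.List.pyRepeat, List.replicate_succ]

theorem pv_fmt_space (x : List Char) : pvFmtLine (' ' :: x) = "&nbsp;".toList ++ pvFmtLine x := by
  have hd : (' ' :: x).dropWhile (· == ' ') = x.dropWhile (· == ' ') := by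
    rw [List.dropWhile_cons_of_pos]; simp
  have hle := List.length_dropWhile_le (· == ' ') x
  unfold pvFmtLine
  rw [hd]
  have hlen : (' ' :: x).length - (x.dropWhile (· == ' ')).length
      = (x.length - (x.dropWhile (· == ' ')).length) + 1 := by
    simp only [List.length_cons]; omega
  rw [hlen]
  by_cases hk : x.length - (x.dropWhile (· == ' ')).length > 0
  · rw [if_pos (by omega), if_pos hk, pv_pyRepeat_succ]
    simp
  · have h0 : x.length - (x.dropWhile (· == ' ')).length = 0 := by omega
    have hxeq : x.dropWhile (· == ' ') = x :=
      (List.dropWhile_suffix _).eq_of_length (by omega)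
    rw [h0]
    simp [PySem.List.pyRepeat, hxeq]

theorem pvEscChar_head_nospace (c : Char) (hc : c ≠ ' ') :
    ∃ d ds, pvEscChar c = d :: ds ∧ d ≠ ' ' := by
  by_cases h1 : c = '&'
  · exact ⟨'&', "amp;".toList, by rw [h1]; decide, by decide⟩
  · by_cases h2 : c = '<'
    · exact ⟨'&', "lt;".toList, by rw [h2]; decide, by decide⟩
    · by_cases h3 : c = '>'
      · exact ⟨'&', "gt;".toList, by rw [h3]; decide, by decide⟩
      · exact ⟨c, [], by simp [pvEscChar, h1, h2, h3], hc⟩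

theorem pv_fmt_escChar (c : Char) (z : List Char) (hc : c ≠ ' ') :
    pvFmtLine (pvEscChar c ++ z) = pvEscChar c ++ z := by
  obtain ⟨d, ds, hds, hdne⟩ := pvEscChar_head_nospace c hc
  rw [hds, List.cons_append, pv_fmt_nospace d _ hdne]

theorem pv_join_cons_append (sep a x : List Char) (r : List (List Char)) :
    PySem.Chars.join sep ((a ++ x) :: r) = a ++ PySem.Chars.join sep (x :: r) := by
  cases r with
  | nil => rw [PySem.Chars.join_singleton, PySem.Chars.join_singleton]
  | cons q rest => rw [PySem.Chars.join_cons_cons, PySem.Chars.join_cons_cons]; simp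

-- the master invariant: B's single pass computes A's join-of-formatted-lines
theorem pv_master (l : List Char) :
    pvGoB true l
      = PySem.Chars.join "<br/>".toList
          ((pvLines l).map (fun x => pvFmtLine (x.flatMap pvEscChar)))
    ∧ pvGoB false l
      = PySem.Chars.join "<br/>".toList
          (((pvLines l).headI.flatMap pvEscChar)
            :: (pvLines l).tail.map (fun x => pvFmtLine (x.flatMap pvEscChar))) := by
  induction l with
  | nil =>
    constructor
    · simp [pvGoB, pvLines, PySem.Chars.join_singleton, pv_fmt_nil]
    · simp [pvGoB, pvLines, PySem.Chars.join_singleton]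
  | cons c t ih =>
    obtain ⟨ih1, ih0⟩ := ih
    obtain ⟨h, tl, hht⟩ := pvLines_cons_shape t
    by_cases hnl : c = '\n'
    · subst hnl
      have hgo : ∀ b, pvGoB b ('\n' :: t) = "<br/>".toList ++ pvGoB true t := by
        intro b; cases b <;> simp [pvGoB]
      have hf0 : pvFmtLine (List.flatMap pvEscChar []) = [] := by decide
      constructor
      · rw [hgo, ih1, hht, pvLines_nl, hht]
        simp only [List.map_cons, hf0]
        rw [PySem.Chars.join_cons_cons, List.nil_append]
      · rw [hgo, ih1, hht, pvLines_nl, hht]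
        simp only [List.headI, List.tail, List.flatMap_nil, List.map_cons]
        rw [PySem.Chars.join_cons_cons, List.nil_append]
    · have hlines : pvLines (c :: t) = (c :: h) :: tl := pvLines_cons c t h tl hnl hht
      have hfm : (c :: h).flatMap pvEscChar = pvEscChar c ++ h.flatMap pvEscChar :=
        List.flatMap_cons ..
      constructor
      · by_cases hsp : c = ' '
        · subst hsp
          have hgo : pvGoB true (' ' :: t) = "&nbsp;".toList ++ pvGoB true t := by
            simp [pvGoB]
          have hsp' : pvEscChar ' ' = [' '] := by decide
          rw [hgo, ih1, hht, hlines, List.map_cons, List.map_cons, hfm, hsp',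
              List.singleton_append, pv_fmt_space, pv_join_cons_append]
        · have hgo : pvGoB true (c :: t) = pvEscChar c ++ pvGoB false t := by
            simp [pvGoB, hsp, hnl]
          rw [hgo, ih0, hht, hlines, List.map_cons, hfm, pv_fmt_escChar c _ hsp,
              pv_join_cons_append]
          simp only [List.headI, List.tail]
      · have hgo : pvGoB false (c :: t) = pvEscChar c ++ pvGoB false t := by
          simp [pvGoB, hnl]
        rw [hgo, ih0, hht, hlines]
        simp only [List.headI, List.tail]
        rw [hfm, pv_join_cons_append]

-- ===== VERDICT (by name: the statement is the Claim_ definition above) =====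
theorem format_content_for_pdf_py_spec : Claim_equal_format_content_for_pdf_py := by
  intro text _
  unfold Spec_format_content_for_pdf_py
  simp only [format_content_for_pdf_py, format_content_for_pdf_py_alt]
  congr 1
  rw [PySem.List.foldl_append_singleton_eq_map, List.nil_append,
      pv_esc_flatMap, pv_split_eq, pv_lines_esc, List.map_map]
  exact ((pv_master text.toList).1).symm
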